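-- pv_equiv track=rewrite | github.com/trevorlecrone/Portfolio | Academic/CSCI5511 - Artificial Intelligence I/HW1 - Eight Puzzle Solver/eight_puzzle.py | get_single_tile_manhattan_distance
-- ===== SOURCE A (Python) =====
-- GOAL_INDICIES = {
--     0 : 1,
--     1 : 2,
--     2 : 3,
--     3 : 8,
--     4 : 9,
--     5 : 4,
--     6 : 7,
--     7 : 6,
--     8 : 5
-- }
--
-- def  get_single_tile_manhattan_distance(tileIndex, digit) :
--     targetIndex = list(GOAL_INDICIES.values()).index(digit)
--     distance = 0
--     #Based on position of target, try to make a vertical move to move closer is possible.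
--     #if on the same row already, move to target position, otherwise try to align for a vertical move
--     while tileIndex != targetIndex :
--         if tileIndex > targetIndex :
--             if tileIndex - 3 >= targetIndex :
--                 tileIndex -= 3
--                 distance += 1
--             #same "row"
--             elif tileIndex // 3 == targetIndex // 3 :
--                 tileIndex -= 1
--                 distance += 1
--             else :
--                 tileIndex += 1
--                 distance += 1
--         else :
--             if tileIndex + 3 <= targetIndex :
--                 tileIndex += 3
--                 distance += 1
--             #same "row"
--             elif tileIndex // 3 == targetIndex // 3 :
--                 tileIndex += 1
--                 distance += 1
--             else :
--                 tileIndex -= 1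
--                 distance += 1
--     return distance
-- ===== SOURCE B (Python) =====
-- GOAL_INDICIES = {
--     0 : 1,
--     1 : 2,
--     2 : 3,
--     3 : 8,
--     4 : 9,
--     5 : 4,
--     6 : 7,
--     7 : 6,
--     8 : 5
-- }
--
-- def get_single_tile_manhattan_distance(tileIndex, digit):
--     targetIndex = list(GOAL_INDICIES.values()).index(digit)
--     return abs(tileIndex // 3 - targetIndex // 3) + abs(tileIndex % 3 - targetIndex % 3)
-- ===== Notes on version B (the rewrite author's own statement) =====
-- stated objective: simpler
-- what changed: Replaced A's step-by-step simulation loop (one grid move per iteration) by the closed-form Manhattan distance |row diff| + |col diff| computed directly from the two indices.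
import Mathlib
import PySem

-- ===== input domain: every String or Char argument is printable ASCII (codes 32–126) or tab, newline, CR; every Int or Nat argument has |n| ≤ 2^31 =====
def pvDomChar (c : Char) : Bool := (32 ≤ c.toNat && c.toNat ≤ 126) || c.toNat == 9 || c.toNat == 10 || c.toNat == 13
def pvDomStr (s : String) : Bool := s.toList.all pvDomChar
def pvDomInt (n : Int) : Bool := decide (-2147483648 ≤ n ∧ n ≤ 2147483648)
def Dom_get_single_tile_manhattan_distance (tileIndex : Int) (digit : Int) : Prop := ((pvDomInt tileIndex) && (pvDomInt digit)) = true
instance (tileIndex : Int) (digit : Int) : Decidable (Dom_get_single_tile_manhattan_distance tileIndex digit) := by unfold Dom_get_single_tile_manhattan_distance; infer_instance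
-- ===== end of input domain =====

-- B replaces A's one-grid-move-per-iteration simulation loop by the closed-form
-- Manhattan distance |row diff| + |col diff|; objective: simpler.

-- ===== PORT A =====
def GOAL_INDICIES : PySem.Dict Int Int :=
  PySem.Dict.ofList [(0, 1), (1, 2), (2, 3), (3, 8), (4, 9), (5, 4), (6, 7), (7, 6), (8, 5)]

-- the while loop of A; fuel only makes the recursion total (Python's loop terminates
-- whenever it is reached; the fuel exceeds the number of iterations on all of Dom)
def pvLoopA : Nat → Int → Int → Int → Int
  | 0, _, _, distance => distance
  | fuel + 1, tileIndex, targetIndex, distance =>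
    if tileIndex = targetIndex then distance
    else if tileIndex > targetIndex then
      if tileIndex - 3 ≥ targetIndex then pvLoopA fuel (tileIndex - 3) targetIndex (distance + 1)
      else if PySem.Int.floordiv tileIndex 3 = PySem.Int.floordiv targetIndex 3 then
        pvLoopA fuel (tileIndex - 1) targetIndex (distance + 1)
      else pvLoopA fuel (tileIndex + 1) targetIndex (distance + 1)
    else
      if tileIndex + 3 ≤ targetIndex then pvLoopA fuel (tileIndex + 3) targetIndex (distance + 1)
      else if PySem.Int.floordiv tileIndex 3 = PySem.Int.floordiv targetIndex 3 then
        pvLoopA fuel (tileIndex + 1) targetIndex (distance + 1)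
      else pvLoopA fuel (tileIndex - 1) targetIndex (distance + 1)

def get_single_tile_manhattan_distance (tileIndex : Int) (digit : Int) : Int :=
  match PySem.List.index? (PySem.Dict.values GOAL_INDICIES) digit with
  | none => 0  -- Python raises ValueError here; excluded by Pre_
  | some targetIndex => pvLoopA 4294967296 tileIndex (targetIndex : Int) 0

-- ===== PORT B =====
def get_single_tile_manhattan_distance_alt (tileIndex : Int) (digit : Int) : Int :=
  match PySem.List.index? (PySem.Dict.values GOAL_INDICIES) digit with
  | none => 0  -- Python raises ValueError here; excluded by Pre_
  | some targetIndex =>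
    |PySem.Int.floordiv tileIndex 3 - PySem.Int.floordiv (targetIndex : Int) 3| +
    |PySem.Int.mod tileIndex 3 - PySem.Int.mod (targetIndex : Int) 3|

-- ===== PRECONDITION & SPEC =====
-- Pre_ excludes exactly the digits absent from GOAL_INDICIES' values, on which
-- Python's list.index raises ValueError in both A and B.
def Pre_get_single_tile_manhattan_distance (tileIndex : Int) (digit : Int) : Prop :=
  digit ∈ ([1, 2, 3, 8, 9, 4, 7, 6, 5] : List Int)
instance (tileIndex : Int) (digit : Int) : Decidable (Pre_get_single_tile_manhattan_distance tileIndex digit) := by unfold Pre_get_single_tile_manhattan_distance; infer_instance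

def pvWitness_get_single_tile_manhattan_distance : Int × Int := (4, 5)

def Spec_get_single_tile_manhattan_distance (tileIndex : Int) (digit : Int) (out : Int) : Prop := out = get_single_tile_manhattan_distance_alt tileIndex digit
instance (tileIndex : Int) (digit : Int) (out : Int) : Decidable (Spec_get_single_tile_manhattan_distance tileIndex digit out) := by unfold Spec_get_single_tile_manhattan_distance; infer_instance

-- ===== CLAIM (what is proved, stated in full; the proofs are below) =====
def Claim_equal_get_single_tile_manhattan_distance : Prop := ∀ (tileIndex : Int) (digit : Int), Dom_get_single_tile_manhattan_distance tileIndex digit → Pre_get_single_tile_manhattan_distance tileIndex digit → Spec_get_single_tile_manhattan_distance tileIndex digit (get_single_tile_manhattan_distance tileIndex digit)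

-- ===== LEMMAS AND PROOFS =====

-- Manhattan distance as a Nat, phrased with Euclidean /,% (equal to Python's for divisor 3)
def pvMan (ti tg : Int) : Nat := (ti / 3 - tg / 3).natAbs + (ti % 3 - tg % 3).natAbs

theorem pvFd (a : Int) : PySem.Int.floordiv a 3 = a / 3 :=
  PySem.Int.floordiv_eq_ediv_of_pos (by norm_num)

theorem pvMd (a : Int) : PySem.Int.mod a 3 = a % 3 :=
  PySem.Int.mod_eq_emod_of_pos (by norm_num)

theorem pvLoopA_eq (tg : Int) :
    ∀ (fuel : Nat) (ti dist : Int), pvMan ti tg ≤ fuel →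
      pvLoopA fuel ti tg dist = dist + (pvMan ti tg : Int) := by
  intro fuel
  induction fuel with
  | zero =>
    intro ti dist h
    have : pvMan ti tg = 0 := Nat.le_zero.mp h
    simp [pvLoopA, this]
  | succ n ih =>
    intro ti dist h
    by_cases hti : ti = tg
    · have h0' : pvMan ti tg = 0 := by unfold pvMan; rw [hti]; simp
      simp only [pvLoopA]
      rw [if_pos hti, h0']
      simp
    · simp only [pvLoopA, pvFd]
      rw [if_neg hti]
      split_ifs with h1 h2 h3 h4 h5 h6 <;>
        rw [ih _ (dist + 1) (by unfold pvMan at *; omega)] <;>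
        (unfold pvMan at *; omega)

theorem pvCore (ti : Int) (hti : -2147483648 ≤ ti ∧ ti ≤ 2147483648)
    (tg : Int) (h0 : 0 ≤ tg) (h9 : tg < 9) :
    pvLoopA 4294967296 ti tg 0 =
      |PySem.Int.floordiv ti 3 - PySem.Int.floordiv tg 3| +
      |PySem.Int.mod ti 3 - PySem.Int.mod tg 3| := by
  rw [pvLoopA_eq tg 4294967296 ti 0 (by unfold pvMan; omega)]
  rw [pvFd, pvFd, pvMd, pvMd]
  unfold pvMan
  rw [Int.abs_eq_natAbs, Int.abs_eq_natAbs]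
  push_cast
  ring

-- ===== VERDICT (by name: the statement is the Claim_ definition above) =====
theorem get_single_tile_manhattan_distance_spec : Claim_equal_get_single_tile_manhattan_distance := by
  intro ti d hdom hpre
  unfold Spec_get_single_tile_manhattan_distance
  unfold get_single_tile_manhattan_distance get_single_tile_manhattan_distance_alt
  have hdom' : -2147483648 ≤ ti ∧ ti ≤ 2147483648 := by
    have := hdom
    simp [Dom_get_single_tile_manhattan_distance, pvDomInt] at this
    exact this.1
  unfold Pre_get_single_tile_manhattan_distance at hpre
  have hv : PySem.Dict.values GOAL_INDICIES = [1, 2, 3, 8, 9, 4, 7, 6, 5] := by decide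
  rw [hv]
  have hs : (PySem.List.index? ([1, 2, 3, 8, 9, 4, 7, 6, 5] : List Int) d).isSome :=
    (PySem.List.index?_isSome_iff ([1, 2, 3, 8, 9, 4, 7, 6, 5] : List Int) d).mpr hpre
  obtain ⟨k, hk⟩ := Option.isSome_iff_exists.mp hs
  rw [hk]
  obtain ⟨hlt, -⟩ := PySem.List.getElem_of_index?_eq_some hk
  have hk9 : k < 9 := by simpa using hlt
  exact pvCore ti hdom' (k : Int) (by positivity) (by exact_mod_cast hk9)
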